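-- pv_equiv track=rewrite | github.com/lminervino18/ai-arm-drawing | python/rescale.py | auto_close_shape
-- ===== SOURCE A (Python) =====
-- def auto_close_shape(points: list[tuple[bool, int, int]]) -> list[tuple[bool, int, int]]:
--     """
--     Automatically closes the shape by connecting the last drawn point to the first, if needed.
--     """
--     if not points:
--         return points
--     drawn = [p for p in points if p[0]]
--     if len(drawn) < 2:
--         return points
--     first = drawn[0][1:]
--     last = drawn[-1][1:]
--     if last != first:
--         points.append((True, *first))
--     return points
-- ===== SOURCE B (Python) =====
-- def auto_close_shape(points: list[tuple[bool, int, int]]) -> list[tuple[bool, int, int]]: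
--     """Close the shape via two endpoint index scans (no filtered list):
--     backward from the end to the last drawn point, forward to the first."""
--     i = len(points) - 1
--     while i >= 0 and not points[i][0]:
--         i -= 1
--     if i < 0:          # no drawn point at all
--         return points
--     j = 0
--     while not points[j][0]:
--         j += 1
--     if j == i:         # only one drawn point
--         return points
--     first = points[j][1:]
--     if points[i][1:] != first:
--         points.append((True, *first))
--     return points
-- ===== Notes on version B (the rewrite author's own statement) =====
-- stated objective: alternative
-- what changed: Replaces A's build-a-filtered-list-then-index strategy with two early-terminating index scans: a backward while-loop to the last drawn point's index and a forward while-loop to the first drawn point's index, deciding 'fewer than two drawn' by index equality instead of the filtered list's length.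
import Mathlib
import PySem

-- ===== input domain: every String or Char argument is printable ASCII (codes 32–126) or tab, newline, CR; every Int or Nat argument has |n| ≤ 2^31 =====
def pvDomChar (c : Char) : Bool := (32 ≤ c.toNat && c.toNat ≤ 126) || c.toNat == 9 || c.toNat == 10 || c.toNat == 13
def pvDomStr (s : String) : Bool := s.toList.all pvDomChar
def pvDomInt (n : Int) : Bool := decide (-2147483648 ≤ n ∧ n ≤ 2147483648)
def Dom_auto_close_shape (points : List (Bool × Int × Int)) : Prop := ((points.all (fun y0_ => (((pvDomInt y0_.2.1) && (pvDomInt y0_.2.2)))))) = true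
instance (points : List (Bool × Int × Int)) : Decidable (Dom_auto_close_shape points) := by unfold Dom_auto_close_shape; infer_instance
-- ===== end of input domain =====

-- B scans backward to the last drawn index and forward to the first drawn index instead of
-- building A's filtered list; equivalence is about the RETURN value (in Python both append
-- the closing point to `points` in place identically).

-- ===== PORT A =====
def auto_close_shape (points : List (Bool × Int × Int)) : List (Bool × Int × Int) :=
  if points = [] then points
  else
    let drawn := points.filter (fun p => p.1)
    if drawn.length < 2 then points
    else
      let first := (drawn.headD (false, 0, 0)).2
      let last := (drawn.getLastD (false, 0, 0)).2
      if last ≠ first then points ++ [(true, first.1, first.2)] else points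

-- ===== PORT B =====
-- backward while-loop: `while i >= 0 and not points[i][0]: i -= 1`; none = the Python i < 0 exit
def scanBack (pts : List (Bool × Int × Int)) : Nat → Option Nat
  | 0 => if (pts.getD 0 (false, 0, 0)).1 then some 0 else none
  | i + 1 => if (pts.getD (i + 1) (false, 0, 0)).1 then some (i + 1) else scanBack pts i

-- forward while-loop `while not points[j][0]: j += 1`, walking the remaining list with index j
def scanFwd : List (Bool × Int × Int) → Nat → Nat
  | [], j => j
  | p :: rest, j => if p.1 then j else scanFwd rest (j + 1)

def auto_close_shape_alt (points : List (Bool × Int × Int)) : List (Bool × Int × Int) :=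
  match scanBack points (points.length - 1) with
  | none => points
  | some i =>
    let j := scanFwd points 0
    if j = i then points
    else
      let first := (points.getD j (false, 0, 0)).2
      if (points.getD i (false, 0, 0)).2 ≠ first then points ++ [(true, first.1, first.2)]
      else points

-- ===== PRECONDITION & SPEC =====
def Spec_auto_close_shape (points : List (Bool × Int × Int)) (out : List (Bool × Int × Int)) : Prop := out = auto_close_shape_alt points
instance (points : List (Bool × Int × Int)) (out : List (Bool × Int × Int)) : Decidable (Spec_auto_close_shape points out) := by unfold Spec_auto_close_shape; infer_instance

-- ===== CLAIM (what is proved, stated in full; the proofs are below) =====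
def Claim_equal_auto_close_shape : Prop := ∀ (points : List (Bool × Int × Int)), Dom_auto_close_shape points → Spec_auto_close_shape points (auto_close_shape points)

-- ===== LEMMAS AND PROOFS =====

-- index of the last drawn point, recursively from the front (proof-side characterisation)
def lastDrawnIdx : List (Bool × Int × Int) → Option Nat
  | [] => none
  | p :: rest =>
    match lastDrawnIdx rest with
    | some k => some (k + 1)
    | none => if p.1 then some 0 else none

-- index of the first drawn point (length of the list if none)
def firstDrawnIdx : List (Bool × Int × Int) → Nat
  | [] => 0
  | p :: rest => if p.1 then 0 else firstDrawnIdx rest + 1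

theorem scanBack_cons (pts : List (Bool × Int × Int)) (p : Bool × Int × Int) :
    ∀ i, scanBack (p :: pts) (i + 1) =
      (match scanBack pts i with
       | some k => some (k + 1)
       | none => if p.1 then some 0 else none) := by
  intro i
  induction i with
  | zero =>
    simp only [scanBack]
    cases hb : (pts.getD 0 (false, 0, 0)).1 <;> simp_all [List.getD]
  | succ n ih =>
    show (if (pts.getD (n+1) _).1 then _ else scanBack (p :: pts) (n+1)) = _
    rw [ih]
    simp only [scanBack]
    cases hb : (pts.getD (n+1) (false,0,0)).1 <;> simp_all [List.getD]

theorem scanBack_eq (pts : List (Bool × Int × Int)) :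
    scanBack pts (pts.length - 1) = lastDrawnIdx pts := by
  induction pts with
  | nil => simp [scanBack, lastDrawnIdx]
  | cons p rest ih =>
    cases rest with
    | nil => simp [scanBack, lastDrawnIdx]
    | cons q rs =>
      have hlen : (p :: q :: rs).length - 1 = ((q :: rs).length - 1) + 1 := by
        simp
      rw [hlen, scanBack_cons, ih]
      cases hk : lastDrawnIdx rs with
      | some k => simp [lastDrawnIdx, hk]
      | none => cases hq : q.1 <;> simp [lastDrawnIdx, hk, hq]

theorem scanFwd_eq (pts : List (Bool × Int × Int)) :
    ∀ j, scanFwd pts j = j + firstDrawnIdx pts := by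
  induction pts with
  | nil => intro j; simp [scanFwd, firstDrawnIdx]
  | cons p rest ih =>
    intro j
    simp only [scanFwd, firstDrawnIdx]
    cases h : p.1 <;> simp [ih] <;> omega

theorem lastDrawnIdx_none_iff (pts : List (Bool × Int × Int)) :
    lastDrawnIdx pts = none ↔ pts.filter (fun p => p.1) = [] := by
  induction pts with
  | nil => simp [lastDrawnIdx]
  | cons p rest ih =>
    simp only [lastDrawnIdx]
    cases h : lastDrawnIdx rest with
    | some k =>
      have : rest.filter (fun p => p.1) ≠ [] := by
        intro hc; rw [ih.mpr hc] at h; simp at h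
      cases hp : p.1 <;> simp [hp, this]
    | none =>
      have hr := ih.mp h
      cases hp : p.1 <;> simp [hp, hr]

theorem lastDrawnIdx_getD (pts : List (Bool × Int × Int)) (i : Nat)
    (h : lastDrawnIdx pts = some i) :
    pts.getD i (false, 0, 0) = (pts.filter (fun p => p.1)).getLastD (false, 0, 0) := by
  induction pts generalizing i with
  | nil => simp [lastDrawnIdx] at h
  | cons p rest ih =>
    simp only [lastDrawnIdx] at h
    cases hr : lastDrawnIdx rest with
    | some k =>
      rw [hr] at h
      have hik : i = k + 1 := by injection h with h'; omega
      subst hik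
      have hrest : rest.filter (fun p => p.1) ≠ [] := by
        intro hc
        rw [(lastDrawnIdx_none_iff rest).mpr hc] at hr; simp at hr
      have hIH := ih k hr
      cases hp : p.1 with
      | true =>
        rw [List.filter_cons_of_pos hp]
        rw [List.getLastD_cons]
        rw [show (rest.filter (fun p => p.1)).getLastD p
              = (rest.filter (fun p => p.1)).getLastD (false,0,0) from by
          rw [List.getLastD_eq_getLast?, List.getLastD_eq_getLast?]
          cases hq : (rest.filter (fun p => p.1)).getLast? with
          | none => exact absurd (List.getLast?_eq_none_iff.mp hq) hrest
          | some v => rfl]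
        simpa using hIH
      | false =>
        rw [List.filter_cons_of_neg (by simp [hp])]
        simpa using hIH
    | none =>
      rw [hr] at h
      cases hp : p.1 with
      | true =>
        rw [hp] at h
        have : i = 0 := by injection h with h'; omega
        subst this
        rw [List.filter_cons_of_pos hp, (lastDrawnIdx_none_iff rest).mp hr]
        rfl
      | false => rw [hp] at h; simp at h

theorem firstDrawnIdx_getD (pts : List (Bool × Int × Int))
    (h : pts.filter (fun p => p.1) ≠ []) :
    pts.getD (firstDrawnIdx pts) (false, 0, 0) = (pts.filter (fun p => p.1)).headD (false, 0, 0) := by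
  induction pts with
  | nil => simp at h
  | cons p rest ih =>
    cases hp : p.1 with
    | true => simp [firstDrawnIdx, hp, List.filter_cons_of_pos hp]
    | false =>
      have hr : rest.filter (fun p => p.1) ≠ [] := by
        rw [List.filter_cons_of_neg (by simp [hp])] at h; exact h
      simp only [firstDrawnIdx, hp, List.filter_cons_of_neg (by simp [hp] : ¬((p.1) = true))]
      simpa using ih hr

theorem first_eq_last_iff (pts : List (Bool × Int × Int)) (i : Nat)
    (h : lastDrawnIdx pts = some i) :
    (firstDrawnIdx pts = i ↔ (pts.filter (fun p => p.1)).length = 1) := by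
  induction pts generalizing i with
  | nil => simp [lastDrawnIdx] at h
  | cons p rest ih =>
    simp only [lastDrawnIdx] at h
    cases hr : lastDrawnIdx rest with
    | some k =>
      rw [hr] at h
      have hik : i = k + 1 := by injection h with h'; omega
      subst hik
      have hrest : rest.filter (fun p => p.1) ≠ [] := by
        intro hc
        rw [(lastDrawnIdx_none_iff rest).mpr hc] at hr; simp at hr
      cases hp : p.1 with
      | true =>
        have hf0 : firstDrawnIdx (p :: rest) = 0 := by simp [firstDrawnIdx, hp]
        rw [hf0, List.filter_cons_of_pos hp, List.length_cons]
        have hlp : (rest.filter Prod.fst).length ≥ 1 :=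
          List.length_pos_iff.mpr hrest
        constructor
        · intro h0; omega
        · intro h1; omega
      | false =>
        have hf : firstDrawnIdx (p :: rest) = firstDrawnIdx rest + 1 := by
          simp [firstDrawnIdx, hp]
        rw [hf, List.filter_cons_of_neg (by simp [hp]), ← ih k hr]
        constructor
        · intro h0; omega
        · intro h0; omega
    | none =>
      rw [hr] at h
      cases hp : p.1 with
      | true =>
        rw [hp] at h
        have : i = 0 := by injection h with h'; omega
        subst this
        simp [firstDrawnIdx, hp, List.filter_cons_of_pos hp,
          (lastDrawnIdx_none_iff rest).mp hr]
      | false => rw [hp] at h; simp at h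

-- ===== VERDICT (by name: the statement is the Claim_ definition above) =====
theorem auto_close_shape_spec : Claim_equal_auto_close_shape := by
  intro pts _
  unfold Spec_auto_close_shape auto_close_shape auto_close_shape_alt
  rw [scanBack_eq, scanFwd_eq]
  cases h : lastDrawnIdx pts with
  | none =>
    have hf := (lastDrawnIdx_none_iff pts).mp h
    simp only [hf, List.length_nil]
    split <;> simp
  | some i =>
    have hne : pts.filter (fun p => p.1) ≠ [] := by
      intro hc; rw [(lastDrawnIdx_none_iff pts).mpr hc] at h; simp at h
    have hptsne : pts ≠ [] := by
      intro hc; subst hc; simp at hne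
    simp only [if_neg hptsne, Nat.zero_add]
    by_cases hji : firstDrawnIdx pts = i
    · -- only one drawn point: both return pts
      have h1 : (pts.filter (fun p => p.1)).length = 1 :=
        (first_eq_last_iff pts i h).mp hji
      simp [hji, h1]
    · have h1 : (pts.filter (fun p => p.1)).length ≠ 1 := by
        intro hc; exact hji ((first_eq_last_iff pts i h).mpr hc)
      have hge : (pts.filter (fun p => p.1)).length ≥ 1 :=
        List.length_pos_iff.mpr hne
      have h2 : ¬ (pts.filter (fun p => p.1)).length < 2 := by omega
      simp only [if_neg h2, if_neg hji]
      rw [lastDrawnIdx_getD pts i h, firstDrawnIdx_getD pts hne]
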